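-- pv_equiv track=rewrite | github.com/crwulff/pseudo-8051 | pseudo8051/passes/annotate.py | _meet_exprs
-- ===== SOURCE A (Python) =====
-- from typing import Dict, List, Optional, Tuple
--
-- def _meet_exprs(pred_exits: List[dict]) -> dict:
--     """Intersect predecessor expr states: keep r→expr only when all preds agree."""
--     if not pred_exits:
--         return {}
--     result = {}
--     all_keys = set().union(*(set(d) for d in pred_exits))
--     for k in all_keys:
--         if any(k not in d for d in pred_exits):
--             continue
--         exprs = [d[k] for d in pred_exits]
--         if all(e == exprs[0] for e in exprs[1:]):
--             result[k] = exprs[0]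
--     return result
-- ===== SOURCE B (Python) =====
-- def _meet_exprs(pred_exits):
--     """Intersect predecessor expr states: keep r->expr only when all preds agree."""
--     if not pred_exits:
--         return {}
--     result = dict(pred_exits[0])
--     for d in pred_exits[1:]:
--         result = {k: v for k, v in result.items() if k in d and d[k] == v}
--     return result
-- ===== Notes on version B (the rewrite author's own statement) =====
-- stated objective: simpler
-- what changed: Instead of unioning all keys of all dicts and re-checking every key against every predecessor dict, B seeds the result with a copy of the first dict and folds over the remaining dicts, each step keeping only the entries the next dict agrees with (a progressively narrowing intersection).
import Mathlib
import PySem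

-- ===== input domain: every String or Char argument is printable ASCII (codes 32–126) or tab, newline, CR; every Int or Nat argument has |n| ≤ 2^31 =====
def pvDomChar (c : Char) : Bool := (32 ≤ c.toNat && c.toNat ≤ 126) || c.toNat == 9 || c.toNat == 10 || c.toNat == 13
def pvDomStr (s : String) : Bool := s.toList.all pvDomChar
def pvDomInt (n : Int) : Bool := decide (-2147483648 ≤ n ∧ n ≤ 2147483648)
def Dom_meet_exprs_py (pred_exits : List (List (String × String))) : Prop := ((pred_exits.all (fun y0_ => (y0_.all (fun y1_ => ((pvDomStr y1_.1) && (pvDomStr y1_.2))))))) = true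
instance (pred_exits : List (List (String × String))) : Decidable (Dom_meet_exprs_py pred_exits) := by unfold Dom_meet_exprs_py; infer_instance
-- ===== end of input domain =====

-- B replaces A's union-all-keys-then-recheck pass by seeding with the first dict and
-- narrowing it through each remaining dict (objective: simpler).

-- Shared input decoding (the type convention's dict reading): each predecessor's
-- (key, value) list denotes the Python dict built by inserting the pairs in order
-- (overwrite in place) — exactly CPython's dict(pairs).
def pvToDict (p : List (String × String)) : PySem.Dict String String :=
  p.foldl (fun d kv => d.insert kv.1 kv.2) PySem.Dict.empty

-- ===== PORT A =====
-- d[k] is ported as getD k "" — exact here because the `any` guard ensures k is in every d;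
-- exprs[0] as headD "" — exact because pred_exits is non-empty on this path.
def meet_exprs_py (pred_exits : List (List (String × String))) : List (String × String) :=
  if pred_exits.isEmpty then []
  else
    let dicts := pred_exits.map pvToDict
    let all_keys : PySem.Set String :=
      dicts.foldl (fun s d => PySem.Set.update s d.keys) PySem.Set.empty
    let result :=
      all_keys.foldl (fun (result : PySem.Dict String String) k =>
        if dicts.any (fun d => !(d.contains k)) then result
        else
          let exprs := dicts.map (fun d => d.getD k "")
          if exprs.tail.all (fun e => e == exprs.headD "") then
            result.insert k (exprs.headD "")
          else result) PySem.Dict.empty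
    result.items

-- ===== PORT B =====
-- the dict comprehension {k: v for k, v in result.items() if k in d and d[k] == v}
-- is the filter of result's items; d[k] as getD k "" is exact under the contains guard.
def meet_exprs_py_alt (pred_exits : List (List (String × String))) : List (String × String) :=
  match pred_exits with
  | [] => []
  | p0 :: rest =>
    (rest.foldl (fun (result : PySem.Dict String String) p =>
        let d := pvToDict p
        PySem.Dict.mk (result.items.filter (fun kv => d.contains kv.1 && (d.getD kv.1 "" == kv.2))))
      (pvToDict p0)).items

-- ===== PRECONDITION & SPEC =====
def Spec_meet_exprs_py (pred_exits : List (List (String × String))) (out : List (String × String)) : Prop := out = meet_exprs_py_alt pred_exits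
instance (pred_exits : List (List (String × String))) (out : List (String × String)) : Decidable (Spec_meet_exprs_py pred_exits out) := by unfold Spec_meet_exprs_py; infer_instance

-- ===== CLAIM (what is proved, stated in full; the proofs are below) =====
def Claim_equal_meet_exprs_py : Prop := ∀ (pred_exits : List (List (String × String))), Dom_meet_exprs_py pred_exits → Spec_meet_exprs_py pred_exits (meet_exprs_py pred_exits)

-- ===== LEMMAS AND PROOFS =====

-- B's fold of filters over the remaining dicts is one filter by the conjunction.
theorem pv_foldl_filter_mk {κ ν α : Type} (q : α → (κ × ν) → Bool) :
    ∀ (l : List α) (init : PySem.Dict κ ν),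
      (l.foldl (fun (res : PySem.Dict κ ν) a => PySem.Dict.mk (res.items.filter (q a))) init).items
        = init.items.filter (fun kv => l.all (fun a => q a kv)) := by
  intro l
  induction l with
  | nil => intro init; simp
  | cons a l ih =>
      intro init
      rw [List.foldl_cons, ih]
      simp only [List.filter_filter, List.all_cons]
      exact List.filter_congr (fun x _ => by rw [Bool.and_comm])

-- A's guarded-insert loop from the empty dict over fresh distinct keys appends the kept pairs.
theorem pv_items_foldl_insert_if (c : String → Bool) (v : String → String) :
    ∀ (l : List String) (acc : PySem.Dict String String), l.Nodup →
      (∀ k ∈ l, acc.contains k = false) →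
      (l.foldl (fun d k => if c k then d.insert k (v k) else d) acc).items
        = acc.items ++ (l.filter c).map (fun k => (k, v k)) := by
  intro l
  induction l with
  | nil => intro acc _ _; simp
  | cons k l ih =>
      intro acc hnd hfresh
      have hk : acc.contains k = false := hfresh k (by simp)
      have hnd' := (List.nodup_cons.mp hnd)
      rw [List.foldl_cons]
      by_cases hc : c k = true
      · have hins : (acc.insert k (v k)).items = acc.items ++ [(k, v k)] := by
          simp [PySem.Dict.insert, hk]
        rw [if_pos hc, ih _ hnd'.2 ?_, hins]
        · simp [hc]
        · intro k' hk'
          rw [PySem.Dict.contains_insert]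
          have : (k' == k) = false := by
            simp only [beq_eq_false_iff_ne, ne_eq]
            exact fun h => hnd'.1 (h ▸ hk')
          simp [this, hfresh k' (by simp [hk'])]
      · rw [if_neg hc, ih _ hnd'.2 (fun k' hk' => hfresh k' (by simp [hk']))]
        simp [hc]

-- extending the key set only adds keys the filter rejects
theorem pv_filter_update (c : String → Bool) :
    ∀ (l : List String) (s : PySem.Set String), (∀ x, c x = true → x ∈ s) →
      (PySem.Set.update s l).filter c = s.filter c := by
  intro l
  induction l with
  | nil => intro s _; rfl
  | cons x l ih =>
      intro s hs
      show (PySem.Set.update (PySem.Set.add s x) l).filter c = s.filter c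
      by_cases hx : s.contains x = true
      · have : PySem.Set.add s x = s := by simp only [PySem.Set.add, hx, if_true]
        rw [this, ih s hs]
      · have hadd : PySem.Set.add s x = s ++ [x] := by
          simp only [PySem.Set.add, if_neg hx]
        have hxns : x ∉ s := by simpa using hx
        have hcx : c x = false := by
          cases hcx : c x with
          | false => rfl
          | true => exact absurd (hs x hcx) hxns
        rw [hadd, ih (s ++ [x]) (fun y hy => List.mem_append_left _ (hs y hy))]
        simp [List.filter_append, hcx]

-- the union-of-all-key-sets fold, flattened
theorem pv_foldl_update_keys :
    ∀ (l : List (PySem.Dict String String)) (s : PySem.Set String),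
      l.foldl (fun s d => PySem.Set.update s d.keys) s
        = PySem.Set.update s (l.flatMap PySem.Dict.keys) := by
  intro l
  induction l with
  | nil => intro s; rfl
  | cons d l ih =>
      intro s
      rw [List.foldl_cons, ih, List.flatMap_cons]
      simp [PySem.Set.update, List.foldl_append]

-- per-key: "present everywhere and all values equal v" as one pass over the dicts
theorem pv_meet_cond (ds : List (PySem.Dict String String)) (v k : String) :
    (!(ds.any fun d => !(d.contains k)) && (ds.map (fun d => d.getD k "")).all (fun e => e == v))
      = ds.all (fun d => d.contains k && (d.getD k "" == v)) := by
  induction ds with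
  | nil => rfl
  | cons d ds ih =>
      simp only [List.any_cons, List.map_cons, List.all_cons, ← ih]
      cases d.contains k <;> cases (d.getD k "" == v) <;>
        cases (ds.any fun d => !(d.contains k)) <;>
        cases ((ds.map fun d => d.getD k "").all fun e => e == v) <;> rfl

theorem pv_keys_toDict_nodup (p : List (String × String)) : (pvToDict p).keys.Nodup := by
  exact PySem.Dict.nodup_keys_foldl_insert_key p Prod.fst (fun _ kv => kv.2) PySem.Dict.empty (by simp [PySem.Dict.empty, PySem.Dict.keys])

-- proof-side names for A's loop condition and stored value
def pvV (p0 : List (String × String)) (k : String) : String := (pvToDict p0).getD k ""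

def pvC (p0 : List (String × String)) (rest : List (List (String × String))) (k : String) : Bool :=
  !(((p0 :: rest).map pvToDict).any fun d => !(d.contains k)) &&
  ((((p0 :: rest).map pvToDict).map (fun d => d.getD k "")).tail.all
     (fun e => e == (((p0 :: rest).map pvToDict).map (fun d => d.getD k "")).headD ""))

theorem pv_A_char (p0 : List (String × String)) (rest : List (List (String × String))) :
    meet_exprs_py (p0 :: rest)
      = ((PySem.Set.update PySem.Set.empty
            (((p0 :: rest).map pvToDict).flatMap PySem.Dict.keys)).filter (pvC p0 rest)).map
          (fun k => (k, pvV p0 k)) := by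
  have hfun : (fun (d : PySem.Dict String String) k =>
      if ((p0 :: rest).map pvToDict).any (fun dd => !(dd.contains k)) then d
      else
        if ((((p0 :: rest).map pvToDict).map (fun dd => dd.getD k "")).tail.all
              (fun e => e == (((p0 :: rest).map pvToDict).map (fun dd => dd.getD k "")).headD "")) then
          d.insert k ((((p0 :: rest).map pvToDict).map (fun dd => dd.getD k "")).headD "")
        else d)
      = (fun d k => if pvC p0 rest k then d.insert k (pvV p0 k) else d) := by
    funext d k
    by_cases h1 : (((p0 :: rest).map pvToDict).any fun dd => !(dd.contains k)) = true
    · rw [if_pos h1]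
      have hfalse : pvC p0 rest k = false := by unfold pvC; rw [h1]; rfl
      rw [hfalse]
      simp
    · have h1' : (((p0 :: rest).map pvToDict).any fun dd => !(dd.contains k)) = false :=
        Bool.eq_false_iff.mpr h1
      rw [if_neg h1]
      have htl : pvC p0 rest k
          = ((((p0 :: rest).map pvToDict).map (fun dd => dd.getD k "")).tail.all
              (fun e => e == (((p0 :: rest).map pvToDict).map (fun dd => dd.getD k "")).headD "")) := by
        unfold pvC; rw [h1']; rfl
      rw [htl]
      rfl
  have h1 : meet_exprs_py (p0 :: rest)
      = ((PySem.Set.update PySem.Set.empty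
            (((p0 :: rest).map pvToDict).flatMap PySem.Dict.keys)).foldl
          (fun d k => if pvC p0 rest k then d.insert k (pvV p0 k) else d) PySem.Dict.empty).items := by
    show ((((p0 :: rest).map pvToDict).foldl (fun s d => PySem.Set.update s d.keys) PySem.Set.empty).foldl
        _ PySem.Dict.empty).items = _
    rw [pv_foldl_update_keys, hfun]
  rw [h1, pv_items_foldl_insert_if (pvC p0 rest) (pvV p0)
        _ PySem.Dict.empty (PySem.Set.nodup_update PySem.Set.empty _ (by simp [PySem.Set.empty]))
        (fun k _ => by simp [PySem.Dict.empty, PySem.Dict.contains])]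
  simp [PySem.Dict.empty]

-- B's entry filter, written on (key, value) pairs
def pvQ (rest : List (List (String × String))) (kv : String × String) : Bool :=
  rest.all fun p => (pvToDict p).contains kv.1 && ((pvToDict p).getD kv.1 "" == kv.2)

theorem pv_B_char (p0 : List (String × String)) (rest : List (List (String × String))) :
    meet_exprs_py_alt (p0 :: rest) = (pvToDict p0).items.filter (pvQ rest) :=
  pv_foldl_filter_mk (fun p kv => (pvToDict p).contains kv.1 && ((pvToDict p).getD kv.1 "" == kv.2))
    rest (pvToDict p0)

-- ===== VERDICT (by name: the statement is the Claim_ definition above) =====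
theorem meet_exprs_py_spec : Claim_equal_meet_exprs_py := by
  intro pred_exits _hdom
  show meet_exprs_py pred_exits = meet_exprs_py_alt pred_exits
  cases pred_exits with
  | nil => rfl
  | cons p0 rest =>
    have hnd0 : (pvToDict p0).keys.Nodup := pv_keys_toDict_nodup p0
    rw [pv_A_char, pv_B_char]
    -- split the key union into the first dict's keys and the rest
    have hsplit : PySem.Set.update PySem.Set.empty (((p0 :: rest).map pvToDict).flatMap PySem.Dict.keys)
        = PySem.Set.update (pvToDict p0).keys ((rest.map pvToDict).flatMap PySem.Dict.keys) := by
      rw [List.map_cons, List.flatMap_cons]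
      rw [show PySem.Set.update PySem.Set.empty ((pvToDict p0).keys ++ (rest.map pvToDict).flatMap PySem.Dict.keys)
            = PySem.Set.update (PySem.Set.update PySem.Set.empty (pvToDict p0).keys)
                ((rest.map pvToDict).flatMap PySem.Dict.keys) by
          simp [PySem.Set.update, List.foldl_append]]
      rw [show PySem.Set.update PySem.Set.empty (pvToDict p0).keys = PySem.Set.ofList (pvToDict p0).keys from rfl,
          PySem.Set.ofList_eq_self_of_nodup _ hnd0]
    rw [hsplit]
    -- A's condition forces membership in the first dict's keys
    rw [pv_filter_update (pvC p0 rest) _ (pvToDict p0).keys ?hmem]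
    case hmem =>
      intro x hx
      have hc : (pvToDict p0).contains x = true := by
        simp [pvC, List.any_cons] at hx
        exact hx.1.1
      exact (PySem.Dict.contains_iff_mem_keys _ _).mp hc
    -- rewrite B's side through the keys
    rw [PySem.Dict.items_eq_map_keys _ hnd0 "", List.filter_map]
    -- both sides are maps of filters over the same Nodup key list
    refine congrArg _ (List.filter_congr ?_)
    intro k hk
    have hcont : (pvToDict p0).contains k = true := (PySem.Dict.contains_iff_mem_keys _ _).mpr hk
    simp only [pvC, List.map_cons, List.any_cons, List.tail_cons, List.headD_cons,
      hcont, Bool.not_true, Bool.false_or]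
    rw [pv_meet_cond]
    simp [pvQ, List.all_map, Function.comp_def]
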